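-- pv_equiv track=rewrite | github.com/azozello/swe | leetcode/2020/multiprocessor_system.py | find_min_time
-- ===== SOURCE A (Python) =====
-- from queue import PriorityQueue
--
-- def find_min_time(num: int, ability: [int], processes: int) -> int:
--     min_time = 0
--
--     queue = PriorityQueue()
--
--     for a in ability:
--         queue.put((-a, a))
--
--     while processes > 0:
--         t_i, t_v = queue.get()
--         processes -= t_v
--         new_value = int(t_v / 2)
--         queue.put((-new_value, new_value))
--         min_time += 1
--
--     return min_time
-- ===== SOURCE B (Python) =====
-- def find_min_time(num: int, ability: [int], processes: int) -> int:
--     # Flatten each ability's halving chain, sort all values descending,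
--     # and count how many largest values are needed to cover `processes`.
--     if processes <= 0:
--         return 0
--     chain = []
--     for a in ability:
--         while a > 0:
--             chain.append(a)
--             a //= 2
--     chain.sort(reverse=True)
--     total = 0
--     ticks = 0
--     for v in chain:
--         total += v
--         ticks += 1
--         if total >= processes:
--             return ticks
--     return ticks  # unreachable when the demand is satisfiable (A never returns here)
-- ===== Notes on version B (the rewrite author's own statement) =====
-- stated objective: alternative
-- what changed: Replaces A's step-by-step priority-queue simulation (pop max, subtract, push its half back) by flattening each ability's full halving chain into one list, sorting it once in descending order, and counting the shortest prefix whose sum reaches processes; Pre_ excludes exactly the inputs (processes > 0 exceeding the total chain work) on which A loops or blocks forever and never returns.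
import Mathlib
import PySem

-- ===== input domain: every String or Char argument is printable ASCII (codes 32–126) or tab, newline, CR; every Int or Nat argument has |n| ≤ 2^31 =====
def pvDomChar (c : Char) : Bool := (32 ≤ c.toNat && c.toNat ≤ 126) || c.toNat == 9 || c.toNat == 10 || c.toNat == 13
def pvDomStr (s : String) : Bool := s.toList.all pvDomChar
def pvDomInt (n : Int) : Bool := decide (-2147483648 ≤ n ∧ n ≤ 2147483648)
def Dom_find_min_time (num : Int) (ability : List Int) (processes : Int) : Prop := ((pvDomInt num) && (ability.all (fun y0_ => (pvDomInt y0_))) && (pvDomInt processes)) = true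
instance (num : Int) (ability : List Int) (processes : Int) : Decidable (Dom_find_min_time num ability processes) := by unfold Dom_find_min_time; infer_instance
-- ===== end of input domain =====

-- B replaces A's priority-queue simulation by flatten-the-halving-chains + one descending
-- sort + a prefix count over the sorted values (alternative decomposition, same values).

-- ===== PORT A =====
-- int(t_v / 2) = truncation toward zero (exact: for |v| ≤ 2^31 the float quotient v/2 is exact)
def pvHalve (v : Int) : Int := if 0 ≤ v then PySem.Int.floordiv v 2 else -(PySem.Int.floordiv (-v) 2)

-- PriorityQueue holding pairs (-a, a): get returns the lexicographically least pair, i.e. the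
-- pair with the first maximal a (tied pairs are identical). Ported as the list of the a's:
-- put = append, get = remove the first maximal element.
def pvPopMax : List Int → Option (Int × List Int)
  | [] => none
  | x :: xs =>
    match pvPopMax xs with
    | none => some (x, [])
    | some (m, rest) => if x < m then some (m, x :: rest) else some (x, xs)

-- A's while loop. The fuel only makes the recursion total: on inputs excluded by
-- Pre_find_min_time Python's loop never returns (queue.get blocks / the loop runs forever);
-- inside Pre_ the fuel is proved sufficient, so it never alters the computation.
def pvLoopA : Nat → List Int → Int → Int → Int
  | 0, _, _, acc => acc
  | fuel + 1, q, p, acc =>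
    if 0 < p then
      match pvPopMax q with
      | none => acc
      | some (v, rest) => pvLoopA fuel (rest ++ [pvHalve v]) (p - v) (acc + 1)
    else acc

def find_min_time (num : Int) (ability : List Int) (processes : Int) : Int :=
  pvLoopA ((ability.map Int.toNat).sum + 1) ability processes 0

-- ===== PORT B =====
-- the inner 'while a > 0: chain.append(a); a //= 2' of Source B
def pvChain (v : Int) : List Int :=
  if h : 0 < v then v :: pvChain (PySem.Int.floordiv v 2) else []
termination_by v.toNat
decreasing_by
  rw [PySem.Int.floordiv_eq_ediv_of_pos (by norm_num)]
  omega

-- the final 'for v in chain: total += v; ticks += 1; if total >= processes: return ticks'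
def pvWalk : List Int → Int → Int → Int → Int
  | [], _, _, ticks => ticks
  | v :: rest, p, total, ticks =>
    if p ≤ total + v then ticks + 1 else pvWalk rest p (total + v) (ticks + 1)

def find_min_time_alt (num : Int) (ability : List Int) (processes : Int) : Int :=
  if processes ≤ 0 then 0
  else pvWalk (PySem.List.sorted (ability.flatMap pvChain) (fun x => x) true) processes 0 0

-- ===== PRECONDITION & SPEC =====
-- total work a single ability a > 0 can ever contribute: a + a//2 + a//4 + … = 2a - (binary digit sum of a)
def pvChainTotal (a : Int) : Int := 2 * a - ((Nat.digits 2 a.toNat).sum : Int)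

-- Pre_ excludes exactly the inputs on which A never returns: processes > 0 while the total
-- halving-chain work of the abilities is < processes (A's loop then runs forever, or blocks
-- in queue.get on an empty queue).
def Pre_find_min_time (num : Int) (ability : List Int) (processes : Int) : Prop :=
  processes ≤ 0 ∨ processes ≤ ((ability.filter (fun a => decide (0 < a))).map pvChainTotal).sum
instance (num : Int) (ability : List Int) (processes : Int) : Decidable (Pre_find_min_time num ability processes) := by
  unfold Pre_find_min_time; infer_instance

def pvWitness_find_min_time : Int × List Int × Int := (2, [3, 1], 4)

def Spec_find_min_time (num : Int) (ability : List Int) (processes : Int) (out : Int) : Prop := out = find_min_time_alt num ability processes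
instance (num : Int) (ability : List Int) (processes : Int) (out : Int) : Decidable (Spec_find_min_time num ability processes out) := by unfold Spec_find_min_time; infer_instance

-- ===== CLAIM (what is proved, stated in full; the proofs are below) =====
def Claim_equal_find_min_time : Prop := ∀ (num : Int) (ability : List Int) (processes : Int), Dom_find_min_time num ability processes → Pre_find_min_time num ability processes → Spec_find_min_time num ability processes (find_min_time num ability processes)

-- ===== LEMMAS AND PROOFS =====

-- the multiset of values A's queue state q can still deliver, as one flat list
def pvFlat (q : List Int) : List Int := q.flatMap pvChain

-- reference count: how many values of l (taken in order) until the running sum reaches p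
def pvGo : List Int → Int → Int
  | [], _ => 0
  | x :: xs, p => if 0 < p then 1 + pvGo xs (p - x) else 0

theorem pvGo_nonpos (l : List Int) (p : Int) (hp : p ≤ 0) : pvGo l p = 0 := by
  cases l with
  | nil => rfl
  | cons x xs => simp [pvGo]; omega

theorem pvChain_pos {a : Int} (h : 0 < a) :
    pvChain a = a :: pvChain (PySem.Int.floordiv a 2) := by
  rw [pvChain]; simp [h]

theorem pvChain_nonpos {a : Int} (h : ¬ 0 < a) : pvChain a = [] := by
  rw [pvChain]; simp [h]

theorem pvChain_mem_le : ∀ (a x : Int), x ∈ pvChain a → x ≤ a := by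
  intro a
  induction a using pvChain.induct with
  | case1 a h ih =>
    intro x hx
    rw [pvChain_pos h] at hx
    rcases List.mem_cons.mp hx with rfl | hx
    · exact le_refl _
    · have := ih x hx
      rw [PySem.Int.floordiv_eq_ediv_of_pos (by norm_num)] at this
      omega
  | case2 a h => intro x hx; rw [pvChain_nonpos h] at hx; simp at hx

theorem pvChain_len_le : ∀ (a : Int), (pvChain a).length ≤ a.toNat := by
  intro a
  induction a using pvChain.induct with
  | case1 a h ih =>
    rw [pvChain_pos h]
    rw [PySem.Int.floordiv_eq_ediv_of_pos (by norm_num)] at ih ⊢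
    simp only [List.length_cons]
    omega
  | case2 a h => rw [pvChain_nonpos h]; simp

theorem pvChain_sum_natCast : ∀ (n : Nat),
    (pvChain (n : Int)).sum = 2 * (n : Int) - ((Nat.digits 2 n).sum : Int) := by
  intro n
  induction n using Nat.strong_induction_on with
  | _ n ih =>
    by_cases h : n = 0
    · subst h
      have h0 : pvChain ((0:Nat) : Int) = [] := pvChain_nonpos (by norm_num)
      rw [h0]; simp
    · have hpos : 0 < (n : Int) := by exact_mod_cast Nat.pos_of_ne_zero h
      rw [pvChain_pos hpos]
      have hfd : PySem.Int.floordiv (n : Int) 2 = ((n / 2 : Nat) : Int) := by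
        exact_mod_cast PySem.Int.floordiv_natCast n 2
      rw [List.sum_cons, hfd, ih (n / 2) (Nat.div_lt_self (Nat.pos_of_ne_zero h) (by norm_num))]
      have hd : Nat.digits 2 n = n % 2 :: Nat.digits 2 (n / 2) :=
        Nat.digits_def' (by norm_num) (Nat.pos_of_ne_zero h)
      rw [hd, List.sum_cons]
      have : n % 2 + 2 * (n / 2) = n := by omega
      push_cast
      omega

theorem pvChain_sum_eq (a : Int) (h : 0 ≤ a) : (pvChain a).sum = pvChainTotal a := by
  have : a = (a.toNat : Int) := by omega
  rw [pvChainTotal, this, pvChain_sum_natCast, Int.toNat_natCast]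

theorem pvFlat_sum : ∀ (q : List Int),
    (pvFlat q).sum = ((q.filter (fun a => decide (0 < a))).map pvChainTotal).sum := by
  intro q
  induction q with
  | nil => rfl
  | cons a t ih =>
    simp only [pvFlat, List.flatMap_cons, List.sum_append] at *
    by_cases h : 0 < a
    · rw [List.filter_cons_of_pos (by simpa using h), List.map_cons, List.sum_cons,
        pvChain_sum_eq a (le_of_lt h), ih]
    · rw [List.filter_cons_of_neg (by simpa using h), pvChain_nonpos h]
      simpa using ih

theorem pvPopMax_ne_none (x : Int) (xs : List Int) : pvPopMax (x :: xs) ≠ none := by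
  simp only [pvPopMax]
  cases pvPopMax xs with
  | none => simp
  | some p => cases p with | mk m rest => by_cases h : x < m <;> simp [h]

theorem pvPopMax_spec : ∀ (q : List Int) (v : Int) (rest : List Int),
    pvPopMax q = some (v, rest) → (v :: rest).Perm q ∧ ∀ x ∈ q, x ≤ v := by
  intro q
  induction q with
  | nil => intro v rest h; simp [pvPopMax] at h
  | cons x xs ih =>
    intro v rest h
    simp only [pvPopMax] at h
    cases hx : pvPopMax xs with
    | none =>
      rw [hx] at h
      simp only [Option.some.injEq, Prod.mk.injEq] at h
      obtain ⟨rfl, rfl⟩ := h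
      cases xs with
      | nil => exact ⟨List.Perm.refl _, by intro y hy; simp at hy; omega⟩
      | cons a b => exact absurd hx (pvPopMax_ne_none a b)
    | some p =>
      cases p with
      | mk m r =>
        rw [hx] at h
        obtain ⟨hperm, hmax⟩ := ih m r hx
        dsimp only at h
        by_cases hlt : x < m
        · rw [if_pos hlt] at h
          injection h with h2
          injection h2 with h3 h4
          subst h3; subst h4
          refine ⟨(List.Perm.swap x m r).trans (hperm.cons x), ?_⟩
          intro y hy
          rcases List.mem_cons.mp hy with rfl | hy
          · omega
          · exact hmax y hy
        · rw [if_neg hlt] at h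
          injection h with h2
          injection h2 with h3 h4
          subst h3; subst h4
          refine ⟨List.Perm.refl _, ?_⟩
          intro y hy
          rcases List.mem_cons.mp hy with rfl | hy
          · exact le_refl _
          · have := hmax y hy; omega

-- a descending-sorted rearrangement of xs IS sorted(xs, reverse=True)
theorem pvSortedDesc_eq (xs ys : List Int) (hperm : ys.Perm xs)
    (hsort : ys.Pairwise (fun a b => b ≤ a)) :
    PySem.List.sorted xs (fun x => x) true = ys := by
  have hp : (PySem.List.sorted xs (fun x => x) true).Perm ys :=
    (PySem.List.sorted_perm xs (fun x => x) true).trans hperm.symm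
  exact List.Perm.eq_of_pairwise (fun a b _ _ h1 h2 => le_antisymm h2 h1)
    (by simpa using PySem.List.sorted_pairwise_rev xs (fun x => x)) hsort hp

theorem pvWalk_go : ∀ (l : List Int) (p t k : Int), 0 < p - t →
    pvWalk l p t k = k + pvGo l (p - t) := by
  intro l
  induction l with
  | nil => intro p t k h; simp [pvWalk, pvGo]
  | cons x xs ih =>
    intro p t k h
    simp only [pvWalk, pvGo, if_pos h]
    by_cases hc : p ≤ t + x
    · rw [if_pos hc, pvGo_nonpos xs (p - t - x) (by omega)]
      omega
    · rw [if_neg hc, ih p (t + x) (k + 1) (by omega),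
        show p - (t + x) = p - t - x from by ring]
      omega

-- main loop invariant: A's greedy pop-max loop counts exactly the descending-sorted prefix
theorem pvLoopA_eq : ∀ (fuel : Nat) (q : List Int) (p acc : Int),
    (0 < p → p ≤ (pvFlat q).sum) → (pvFlat q).length < fuel →
    pvLoopA fuel q p acc = acc + pvGo (PySem.List.sorted (pvFlat q) (fun x => x) true) p := by
  intro fuel
  induction fuel with
  | zero => intro q p acc _ hlen; omega
  | succ fuel ih =>
    intro q p acc hsum hlen
    by_cases hp : 0 < p
    · have hsum' := hsum hp
      have hflat_ne : pvFlat q ≠ [] := by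
        intro hnil; rw [hnil] at hsum'; simp at hsum'; omega
      have hq_ne : q ≠ [] := by
        intro hnil; apply hflat_ne; rw [hnil]; rfl
      obtain ⟨x, xs, rfl⟩ := List.exists_cons_of_ne_nil hq_ne
      obtain ⟨⟨v, rest⟩, hpop⟩ :
          ∃ pr, pvPopMax (x :: xs) = some pr := by
        cases hpm : pvPopMax (x :: xs) with
        | none => exact absurd hpm (pvPopMax_ne_none x xs)
        | some pr => exact ⟨pr, rfl⟩
      obtain ⟨hperm, hmax⟩ := pvPopMax_spec _ _ _ hpop
      -- v is positive: some chain is nonempty, so some element of q is positive, and v is max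
      have hvpos : 0 < v := by
        have : ∃ a ∈ (x :: xs), pvChain a ≠ [] := by
          by_contra hall
          push_neg at hall
          apply hflat_ne
          simp only [pvFlat, List.flatMap_eq_nil_iff]
          exact hall
        obtain ⟨a, ha, hca⟩ := this
        have hapos : 0 < a := by
          by_contra hna; exact hca (pvChain_nonpos hna)
        have := hmax a ha
        omega
      have hhalve : pvHalve v = PySem.Int.floordiv v 2 := by
        simp [pvHalve, le_of_lt hvpos]
      -- pvFlat q ~ v :: pvFlat (rest ++ [pvHalve v])
      have hflat_perm : (pvFlat (x :: xs)).Perm (v :: pvFlat (rest ++ [pvHalve v])) := by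
        have h1 : (pvFlat (x :: xs)).Perm (pvFlat (v :: rest)) :=
          (hperm.flatMap_right pvChain).symm
        have h2 : pvFlat (v :: rest) =
            v :: (pvChain (PySem.Int.floordiv v 2) ++ pvFlat rest) := by
          simp [pvFlat, pvChain_pos hvpos]
        have h3 : pvFlat (rest ++ [pvHalve v]) =
            pvFlat rest ++ pvChain (PySem.Int.floordiv v 2) := by
          simp [pvFlat, hhalve]
        rw [h2] at h1
        refine h1.trans (List.Perm.cons v ?_)
        rw [h3]
        exact List.perm_append_comm
      -- every remaining value is ≤ v
      have hub : ∀ y ∈ pvFlat (x :: xs), y ≤ v := by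
        intro y hy
        simp only [pvFlat, List.mem_flatMap] at hy
        obtain ⟨a, ha, hya⟩ := hy
        have := pvChain_mem_le a y hya
        have := hmax a ha
        omega
      -- sorted (pvFlat q) = v :: sorted (pvFlat q')
      have hsorted : PySem.List.sorted (pvFlat (x :: xs)) (fun x => x) true =
          v :: PySem.List.sorted (pvFlat (rest ++ [pvHalve v])) (fun x => x) true := by
        apply pvSortedDesc_eq
        · refine List.Perm.trans ?_ hflat_perm.symm
          exact (PySem.List.sorted_perm _ (fun x => x) true).cons v
        · rw [List.pairwise_cons]
          constructor
          · intro b hb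
            have hb' : b ∈ pvFlat (rest ++ [pvHalve v]) := by
              have := (PySem.List.sorted_perm (pvFlat (rest ++ [pvHalve v])) (fun x => x) true).mem_iff.mp hb
              exact this
            have : b ∈ pvFlat (x :: xs) := hflat_perm.symm.subset (List.mem_cons_of_mem v hb')
            exact hub b this
          · simpa using PySem.List.sorted_pairwise_rev (pvFlat (rest ++ [pvHalve v])) (fun x => x)
      -- unfold one loop step and apply the induction hypothesis
      have hstep : pvLoopA (fuel + 1) (x :: xs) p acc =
          pvLoopA fuel (rest ++ [pvHalve v]) (p - v) (acc + 1) := by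
        simp [pvLoopA, if_pos hp, hpop]
      rw [hstep, ih (rest ++ [pvHalve v]) (p - v) (acc + 1) ?_ ?_]
      · rw [hsorted]
        simp only [pvGo, if_pos hp]
        omega
      · intro hpv
        have := hflat_perm.sum_eq
        simp only [List.sum_cons] at this
        omega
      · have := hflat_perm.length_eq
        simp only [List.length_cons] at this
        omega
    · rw [pvLoopA, if_neg hp, pvGo_nonpos _ p (by omega)]
      omega

theorem pvFlat_len_le : ∀ (q : List Int), (pvFlat q).length ≤ (q.map Int.toNat).sum := by
  intro q
  induction q with
  | nil => simp [pvFlat]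
  | cons a t ih =>
    simp only [pvFlat, List.flatMap_cons, List.length_append, List.map_cons, List.sum_cons]
    have := pvChain_len_le a
    rw [pvFlat] at ih
    omega

-- ===== VERDICT (by name: the statement is the Claim_ definition above) =====
theorem find_min_time_spec : Claim_equal_find_min_time := by
  intro num ability p _ hpre
  unfold Spec_find_min_time find_min_time find_min_time_alt
  have hsum : 0 < p → p ≤ (pvFlat ability).sum := by
    intro hp
    rcases hpre with h | h
    · omega
    · rw [pvFlat_sum]; exact h
  rw [pvLoopA_eq ((ability.map Int.toNat).sum + 1) ability p 0 hsum
        (by have := pvFlat_len_le ability; omega)]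
  by_cases hp : p ≤ 0
  · rw [if_pos hp, pvGo_nonpos _ p hp]
    omega
  · rw [if_neg hp, pvWalk_go _ p 0 0 (by omega)]
    simp [pvFlat]
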